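-- pv_equiv track=rewrite | github.com/picasso653/codesignal_-codes | Interview Prep/dont_stringify_the_numbers.py | solution
-- ===== SOURCE A (Python) =====
-- def solution(n):
--     res = 1
--     odd = False
--     while n > 0:
--         digit = n % 10
--         if digit % 2 == 1:
--             odd = True
--             res *= digit
--         n = n // 10
--     return res if odd else 0
--     pass
-- ===== SOURCE B (Python) =====
-- def solution(n):
--     def odd_digits(m):
--         if m <= 0:
--             return []
--         d = m % 10
--         return ([d] if d % 2 == 1 else []) + odd_digits(m // 10)
--
--     odds = odd_digits(n)
--     res = 1
--     for d in odds:
--         res *= d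
--     return res if odds else 0
-- ===== Notes on version B (the rewrite author's own statement) =====
-- stated objective: alternative
-- what changed: Replaces A's single accumulate-with-flag while loop by a collect-then-reduce decomposition: a recursive function gathers the odd digits into a list, then a fold multiplies them, with 0 returned when the list is empty.
import Mathlib
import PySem

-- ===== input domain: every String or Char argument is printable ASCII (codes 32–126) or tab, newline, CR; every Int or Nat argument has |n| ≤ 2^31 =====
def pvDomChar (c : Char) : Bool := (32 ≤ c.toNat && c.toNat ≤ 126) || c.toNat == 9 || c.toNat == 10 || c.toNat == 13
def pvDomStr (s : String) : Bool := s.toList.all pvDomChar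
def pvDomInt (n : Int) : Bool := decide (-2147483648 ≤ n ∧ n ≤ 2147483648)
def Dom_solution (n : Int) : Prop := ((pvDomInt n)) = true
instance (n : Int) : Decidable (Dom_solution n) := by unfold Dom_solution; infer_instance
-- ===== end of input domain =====

-- B replaces A's accumulate-with-flag while loop by collect-then-reduce: gather odd digits recursively, then fold a product (alternative decomposition, same cost).


theorem pv_floordiv_ten_lt (n : Int) (h : 0 < n) :
    (PySem.Int.floordiv n 10).toNat < n.toNat := by
  rw [PySem.Int.floordiv_eq_ediv_of_pos (by omega : (0:Int) < 10)]
  have h1 := Int.ediv_add_emod n 10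
  have h2 := Int.emod_nonneg n (by omega : (10:Int) ≠ 0)
  have h3 := Int.emod_lt_of_pos n (by omega : (0:Int) < 10)
  omega

-- ===== PORT A =====
def solutionLoop (n res : Int) (odd : Bool) : Int :=
  if 0 < n then
    let digit := PySem.Int.mod n 10
    if PySem.Int.mod digit 2 == 1 then
      solutionLoop (PySem.Int.floordiv n 10) (res * digit) true
    else
      solutionLoop (PySem.Int.floordiv n 10) res odd
  else
    if odd then res else 0
termination_by n.toNat
decreasing_by all_goals exact pv_floordiv_ten_lt n (by omega)

def solution (n : Int) : Int := solutionLoop n 1 false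

-- ===== PORT B =====
def oddDigits (m : Int) : List Int :=
  if m ≤ 0 then []
  else
    let d := PySem.Int.mod m 10
    (if PySem.Int.mod d 2 == 1 then [d] else []) ++ oddDigits (PySem.Int.floordiv m 10)
termination_by m.toNat
decreasing_by exact pv_floordiv_ten_lt m (by omega)

def solution_alt (n : Int) : Int :=
  let odds := oddDigits n
  let res := odds.foldl (· * ·) 1
  if odds = [] then 0 else res

-- ===== PRECONDITION & SPEC =====
def Spec_solution (n : Int) (out : Int) : Prop := out = solution_alt n
instance (n : Int) (out : Int) : Decidable (Spec_solution n out) := by unfold Spec_solution; infer_instance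

-- ===== CLAIM (what is proved, stated in full; the proofs are below) =====
def Claim_equal_solution : Prop := ∀ (n : Int), Dom_solution n → Spec_solution n (solution n)

-- ===== LEMMAS AND PROOFS =====

theorem loop_eq_oddDigits :
    ∀ (k : Nat) (n : Int), n.toNat ≤ k → ∀ (res : Int) (odd : Bool),
      solutionLoop n res odd =
        if oddDigits n = [] then (if odd then res else 0)
        else (oddDigits n).foldl (· * ·) res := by
  intro k
  induction k with
  | zero =>
    intro n hn res odd
    rw [solutionLoop, oddDigits]
    rw [if_neg (by omega : ¬ 0 < n), if_pos (by omega : n ≤ 0)]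
    simp
  | succ k ih =>
    intro n hn res odd
    by_cases h : 0 < n
    · have hlt := pv_floordiv_ten_lt n h
      have hrec : (PySem.Int.floordiv n 10).toNat ≤ k := by omega
      rw [solutionLoop, oddDigits]
      rw [if_pos h, if_neg (by omega : ¬ n ≤ 0)]
      by_cases hodd : PySem.Int.mod (PySem.Int.mod n 10) 2 == 1
      · simp only [hodd, if_pos]
        rw [ih _ hrec]
        cases hrest : oddDigits (PySem.Int.floordiv n 10) with
        | nil => simp [List.foldl]
        | cons x xs => simp [List.foldl]
      · simp only [hodd, if_neg, Bool.false_eq_true, not_false_eq_true]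
        rw [ih _ hrec]
        simp
    · rw [solutionLoop, oddDigits]
      rw [if_neg h, if_pos (by omega : n ≤ 0)]
      simp

-- ===== VERDICT (by name: the statement is the Claim_ definition above) =====
theorem solution_spec : Claim_equal_solution := by
  intro n _
  unfold Spec_solution solution solution_alt
  rw [loop_eq_oddDigits n.toNat n le_rfl]
  by_cases h : oddDigits n = [] <;> simp [h]
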